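-- pv_equiv track=rewrite | github.com/raghavpatnecha/VeteranCareer-AI | app/scrapers/scraper_manager.py | _normalize_experience
-- ===== SOURCE A (Python) =====
-- def _normalize_experience(experience_text: str) -> str:
--     """Normalize experience text to standard levels."""
--     if not experience_text:
--         return "not_specified"
--
--     exp_lower = experience_text.lower()
--
--     if any(word in exp_lower for word in ['fresher', '0 year', 'no experience']):
--         return "entry"
--     elif any(word in exp_lower for word in ['1-3', '2-4', '0-3']):
--         return "entry"
--     elif any(word in exp_lower for word in ['3-6', '4-7', '5-8']):
--         return "mid"
--     elif any(word in exp_lower for word in ['6+', '7+', '8+', 'senior']):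
--         return "senior"
--     elif any(word in exp_lower for word in ['10+', '12+', 'executive', 'manager']):
--         return "executive"
--     else:
--         return "mid"  # Default
-- ===== SOURCE B (Python) =====
-- # B: score-based classification — scan ALL keywords once, keep the minimum priority rank
-- # of the matched ones, then index a level table; no early return / elif chain.
-- RANK = {
--     'fresher': 0, '0 year': 0, 'no experience': 0,
--     '1-3': 1, '2-4': 1, '0-3': 1,
--     '3-6': 2, '4-7': 2, '5-8': 2,
--     '6+': 3, '7+': 3, '8+': 3, 'senior': 3,
--     '10+': 4, '12+': 4, 'executive': 4, 'manager': 4,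
-- }
-- LEVELS = ['entry', 'entry', 'mid', 'senior', 'executive', 'mid']
--
-- def _normalize_experience(experience_text: str) -> str:
--     if not experience_text:
--         return "not_specified"
--     exp_lower = experience_text.lower()
--     best = min((rank for kw, rank in RANK.items() if kw in exp_lower), default=5)
--     return LEVELS[best]
-- ===== Notes on version B (the rewrite author's own statement) =====
-- stated objective: alternative
-- what changed: Replaced A's early-returning if/elif chain of any() group tests by a score-based classifier: every keyword carries a priority rank, the text is scanned once against all 17 keywords keeping the minimum rank of the matches, and the result is looked up in a rank-to-level table (rank 5 = no match = 'mid').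
import Mathlib
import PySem

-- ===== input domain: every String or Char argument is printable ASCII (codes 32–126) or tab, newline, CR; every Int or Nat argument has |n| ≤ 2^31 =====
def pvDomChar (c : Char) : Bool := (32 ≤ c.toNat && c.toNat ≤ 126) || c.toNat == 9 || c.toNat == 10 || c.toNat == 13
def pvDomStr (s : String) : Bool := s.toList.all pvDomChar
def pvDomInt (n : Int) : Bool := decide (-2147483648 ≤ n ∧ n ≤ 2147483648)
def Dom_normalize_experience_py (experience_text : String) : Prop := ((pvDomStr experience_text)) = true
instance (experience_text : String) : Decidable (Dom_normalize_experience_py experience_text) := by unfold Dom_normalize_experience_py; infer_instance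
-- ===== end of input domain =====

-- B replaces A's early-returning if/elif chain by a score-based classifier: a one-pass
-- minimum-rank fold over all 17 ranked keywords, then a table lookup (objective: alternative).

-- ===== PORT A =====
def normalize_experience_py (experience_text : String) : String :=
  if experience_text = "" then "not_specified"
  else
    let exp_lower := PySem.Str.lower experience_text
    if ["fresher", "0 year", "no experience"].any (fun word => PySem.Str.isIn word exp_lower) then "entry"
    else if ["1-3", "2-4", "0-3"].any (fun word => PySem.Str.isIn word exp_lower) then "entry"
    else if ["3-6", "4-7", "5-8"].any (fun word => PySem.Str.isIn word exp_lower) then "mid"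
    else if ["6+", "7+", "8+", "senior"].any (fun word => PySem.Str.isIn word exp_lower) then "senior"
    else if ["10+", "12+", "executive", "manager"].any (fun word => PySem.Str.isIn word exp_lower) then "executive"
    else "mid"

-- ===== PORT B =====
def pvRank : List (String × Nat) :=
  [("fresher", 0), ("0 year", 0), ("no experience", 0),
   ("1-3", 1), ("2-4", 1), ("0-3", 1),
   ("3-6", 2), ("4-7", 2), ("5-8", 2),
   ("6+", 3), ("7+", 3), ("8+", 3), ("senior", 3),
   ("10+", 4), ("12+", 4), ("executive", 4), ("manager", 4)]

def pvLevels : List String := ["entry", "entry", "mid", "senior", "executive", "mid"]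

-- Python's min(generator, default=5): iterate the dict in insertion order keeping the
-- smallest matched rank; since every rank < 5, starting the fold at 5 computes exactly it.
def normalize_experience_py_alt (experience_text : String) : String :=
  if experience_text = "" then "not_specified"
  else
    let exp_lower := PySem.Str.lower experience_text
    let best := pvRank.foldl (fun acc p => if PySem.Str.isIn p.1 exp_lower then Nat.min acc p.2 else acc) 5
    (PySem.List.pyGet? pvLevels (best : Int)).getD ""

-- ===== PRECONDITION & SPEC =====
def Spec_normalize_experience_py (experience_text : String) (out : String) : Prop := out = normalize_experience_py_alt experience_text
instance (experience_text : String) (out : String) : Decidable (Spec_normalize_experience_py experience_text out) := by unfold Spec_normalize_experience_py; infer_instance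

-- ===== CLAIM (what is proved, stated in full; the proofs are below) =====
def Claim_equal_normalize_experience_py : Prop := ∀ (experience_text : String), Dom_normalize_experience_py experience_text → Spec_normalize_experience_py experience_text (normalize_experience_py experience_text)

-- ===== LEMMAS AND PROOFS =====

-- folding the min-rank accumulator over a block of keywords that all carry rank r
-- = one any() test deciding whether r enters the running minimum
theorem pvFold_group (g : List String) (r : Nat) (rest : List (String × Nat)) (low : String) (a : Nat) :
    List.foldl (fun acc p => if PySem.Str.isIn p.1 low then Nat.min acc p.2 else acc)
        a (g.map (fun kw => (kw, r)) ++ rest)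
      = List.foldl (fun acc p => if PySem.Str.isIn p.1 low then Nat.min acc p.2 else acc)
          (if g.any (fun kw => PySem.Str.isIn kw low) then Nat.min a r else a) rest := by
  induction g generalizing a with
  | nil => simp
  | cons kw g ih =>
    by_cases h : PySem.Str.isIn kw low = true
    · simp only [List.map_cons, List.cons_append, List.foldl_cons, List.any_cons, h,
        Bool.true_or, if_pos, ih, Nat.min_assoc, Nat.min_self]
      by_cases h2 : g.any (fun kw => PySem.Str.isIn kw low) = true <;> simp
    · simp only [List.map_cons, List.cons_append, List.foldl_cons, List.any_cons, h,
        Bool.false_or, ih]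
      simp

-- ===== VERDICT (by name: the statement is the Claim_ definition above) =====
theorem normalize_experience_py_spec : Claim_equal_normalize_experience_py := by
  intro s _
  unfold Spec_normalize_experience_py normalize_experience_py normalize_experience_py_alt
  by_cases hs : s = ""
  · simp [hs]
  · simp only [hs, if_false]
    set low := PySem.Str.lower s with hlow
    have hK : pvRank
        = ["fresher", "0 year", "no experience"].map (fun kw => (kw, 0))
          ++ (["1-3", "2-4", "0-3"].map (fun kw => (kw, 1))
          ++ (["3-6", "4-7", "5-8"].map (fun kw => (kw, 2))
          ++ (["6+", "7+", "8+", "senior"].map (fun kw => (kw, 3))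
          ++ (["10+", "12+", "executive", "manager"].map (fun kw => (kw, 4)) ++ [])))) := rfl
    rw [hK, pvFold_group, pvFold_group, pvFold_group, pvFold_group, pvFold_group]
    by_cases h1 : (["fresher", "0 year", "no experience"].any (fun kw => PySem.Str.isIn kw low)) = true <;>
    by_cases h2 : (["1-3", "2-4", "0-3"].any (fun kw => PySem.Str.isIn kw low)) = true <;>
    by_cases h3 : (["3-6", "4-7", "5-8"].any (fun kw => PySem.Str.isIn kw low)) = true <;>
    by_cases h4 : (["6+", "7+", "8+", "senior"].any (fun kw => PySem.Str.isIn kw low)) = true <;>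
    by_cases h5 : (["10+", "12+", "executive", "manager"].any (fun kw => PySem.Str.isIn kw low)) = true <;>
      simp only [h1, h2, h3, h4, h5, if_pos, if_neg, Bool.not_eq_true, List.foldl_nil] <;>
      rfl
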